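-- pv_equiv track=rewrite | github.com/wavymejti/HDB3-AMI-interpreter | hdb3.py | ami_to_hdb3
-- ===== SOURCE A (Python) =====
-- def ami_to_hdb3(ami):
--     """Funkcja zamienia kodowanie AMI na HDB3."""
--     hdb3 = []
--     last_pulse = 0  # Przechowuje ostatni impuls (1 lub -1)
--     zero_count = 0  # Licznik kolejnych zer
--     bipolar_violation_count = 0  # Licznik naruszeń bipolarności (B)
--
--     for signal in ami:
--         if signal == 0:
--             zero_count += 1
--             if zero_count == 4:
--                 # Zastępujemy 4 zera odpowiednim wzorcem (B00V lub 000V)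
--                 if bipolar_violation_count % 2 == 0:
--                     # Wstawiamy wzorzec B00V
--                     hdb3[-3:] = [1 if last_pulse <= 0 else -1, 0, 0]
--                     hdb3.append(-1 if last_pulse <= 0 else 1)  # V
--                 else:
--                     # Wstawiamy wzorzec 000V
--                     hdb3[-3:] = [0, 0, 0]
--                     hdb3.append(-1 if last_pulse <= 0 else 1)  # V
--
--                 bipolar_violation_count += 1
--                 last_pulse = hdb3[-1]  # Aktualizujemy ostatni impuls
--                 zero_count = 0  # Resetujemy licznik zer
--             else:
--                 hdb3.append(0)  # Dodajemy zero
--         else: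
--             hdb3.append(signal)  # Przepisujemy sygnał AMI
--             last_pulse = signal  # Aktualizujemy ostatni impuls
--             zero_count = 0  # Resetujemy licznik zer
--
--     return hdb3
-- ===== SOURCE B (Python) =====
-- def ami_to_hdb3(ami):
--     """AMI -> HDB3 via run-length encoding: tokenize into (zero_run, pulse)
--     pairs, then emit each run's substitutions with divmod arithmetic (within
--     one run every V keeps the same polarity, so no per-symbol state machine)."""
--     # Stage 1: run-length encode.
--     runs = []
--     z = 0
--     for s in ami:
--         if s == 0:
--             z += 1
--         else:
--             runs.append((z, s))
--             z = 0
--     runs.append((z, None))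
--     # Stage 2: per-run closed-form emission.
--     out = []
--     lp = 0   # last pulse
--     c = 0    # substitution count (parity picks B00V vs 000V)
--     for z, s in runs:
--         q, r = divmod(z, 4)
--         if q:
--             v = -1 if lp <= 0 else 1
--             for i in range(c, c + q):
--                 out += ([-v, 0, 0] if i % 2 == 0 else [0, 0, 0])
--                 out.append(v)
--             lp = v
--             c += q
--         out += [0] * r
--         if s is not None:
--             out.append(s)
--             lp = s
--     return out
-- ===== Notes on version B (the rewrite author's own statement) =====
-- stated objective: alternative
-- what changed: Replaces A's per-symbol state machine with slice backpatching (hdb3[-3:]) by two staged passes: run-length encode the input into (zero_run, pulse) tokens, then emit each run's B00V/000V substitutions in closed form with divmod(z,4), using the fact that all violation pulses within one zero run share the same polarity.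
import Mathlib
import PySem

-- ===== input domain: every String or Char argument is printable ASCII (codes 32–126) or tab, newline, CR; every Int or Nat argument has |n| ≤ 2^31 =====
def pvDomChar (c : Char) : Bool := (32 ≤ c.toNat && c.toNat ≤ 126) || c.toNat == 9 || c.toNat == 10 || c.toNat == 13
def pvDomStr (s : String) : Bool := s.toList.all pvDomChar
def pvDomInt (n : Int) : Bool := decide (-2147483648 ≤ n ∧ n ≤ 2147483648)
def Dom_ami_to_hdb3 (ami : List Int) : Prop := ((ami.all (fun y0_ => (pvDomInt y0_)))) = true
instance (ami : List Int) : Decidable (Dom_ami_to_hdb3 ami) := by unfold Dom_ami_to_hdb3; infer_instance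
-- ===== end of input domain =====

-- B replaces A's per-symbol state machine (with hdb3[-3:] backpatching) by two staged
-- passes: run-length encode into (zero_run, pulse) tokens, then emit each run's
-- substitutions with divmod(z, 4) arithmetic; objective: alternative, same cost.

-- ===== PORT A =====
-- A's loop state: (hdb3, last_pulse, zero_count, bipolar_violation_count).
-- 'hdb3[-3:] = pat' is ported as take (length - 3) ++ pat (exact: Python replaces the
-- last three slots, clamping at the front like Nat subtraction does).
-- 'last_pulse = hdb3[-1]' uses pyGet? (-1); the .getD 0 default is never taken since
-- hdb3 just received an append.
def amiA_loop : List Int → List Int → Int → Int → Int → List Int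
  | [], hdb3, _lp, _zc, _bvc => hdb3
  | signal :: rest, hdb3, lp, zc, bvc =>
    if signal = 0 then
      if zc + 1 = 4 then
        let h2 : List Int :=
          if bvc % 2 = 0 then
            (hdb3.take (hdb3.length - 3) ++ [if lp ≤ 0 then (1 : Int) else -1, 0, 0])
              ++ [if lp ≤ 0 then (-1 : Int) else 1]
          else
            (hdb3.take (hdb3.length - 3) ++ [(0 : Int), 0, 0])
              ++ [if lp ≤ 0 then (-1 : Int) else 1]
        amiA_loop rest h2 ((PySem.List.pyGet? h2 (-1)).getD 0) 0 (bvc + 1)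
      else
        amiA_loop rest (hdb3 ++ [0]) lp (zc + 1) bvc
    else
      amiA_loop rest (hdb3 ++ [signal]) signal 0 bvc

def ami_to_hdb3 (ami : List Int) : List Int := amiA_loop ami [] 0 0 0

-- ===== PORT B =====
-- Stage 1 of Source B: run-length encode; the Python loop's accumulator z becomes the
-- recursion argument, the final runs.append((z, None)) is the base case.
def amiB_rle : List Int → Int → List (Int × Option Int)
  | [], z => [(z, none)]
  | s :: rest, z => if s = 0 then amiB_rle rest (z + 1) else (z, some s) :: amiB_rle rest 0

-- Stage 2 of Source B: per-run emission over state (out, lp, c); the inner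
-- 'for i in range(c, c+q)' is a foldl over PySem.List.pyRange.
def amiB_gen : List (Int × Option Int) → List Int → Int → Int → List Int
  | [], out, _lp, _c => out
  | (z, s) :: t, out, lp, c =>
    let q := PySem.Int.floordiv z 4
    let r := PySem.Int.mod z 4
    let st :=
      if q ≠ 0 then
        let v : Int := if lp ≤ 0 then -1 else 1
        (((PySem.List.pyRange c (c + q) 1).foldl
            (fun o i => (o ++ (if PySem.Int.mod i 2 = 0 then [-v, 0, 0] else [0, 0, 0])) ++ [v])
            out), v, c + q)
      else (out, lp, c)
    let out2 := st.1 ++ List.replicate r.toNat 0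
    match s with
    | some sv => amiB_gen t (out2 ++ [sv]) sv st.2.2
    | none => amiB_gen t out2 st.2.1 st.2.2

def ami_to_hdb3_alt (ami : List Int) : List Int := amiB_gen (amiB_rle ami 0) [] 0 0

-- ===== PRECONDITION & SPEC =====
def Spec_ami_to_hdb3 (ami : List Int) (out : List Int) : Prop := out = ami_to_hdb3_alt ami
instance (ami : List Int) (out : List Int) : Decidable (Spec_ami_to_hdb3 ami out) := by unfold Spec_ami_to_hdb3; infer_instance

-- ===== CLAIM (what is proved, stated in full; the proofs are below) =====
def Claim_equal_ami_to_hdb3 : Prop := ∀ (ami : List Int), Dom_ami_to_hdb3 ami → Spec_ami_to_hdb3 ami (ami_to_hdb3 ami)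

-- ===== LEMMAS AND PROOFS =====

-- The run-length encoding of rest starting at accumulator z is its encoding at 0 with
-- the head run lengthened by z.
lemma amiB_rle_decomp (rest : List Int) :
    ∃ (k : Int) (s : Option Int) (t : List (Int × Option Int)), 0 ≤ k ∧
      ∀ z : Int, amiB_rle rest z = (z + k, s) :: t := by
  induction rest with
  | nil => exact ⟨0, none, [], le_refl 0, fun z => by simp [amiB_rle]⟩
  | cons x rest ih =>
    obtain ⟨k, s, t, hk, hz⟩ := ih
    by_cases hx : x = 0
    · refine ⟨k + 1, s, t, by omega, fun z => ?_⟩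
      simp [amiB_rle, hx, hz (z + 1)]; ring_nf
    · exact ⟨0, some x, amiB_rle rest 0, le_refl 0, fun z => by simp [amiB_rle, hx]⟩

-- Four extra zeros in the head run equal one B00V/000V pattern prepended to its output.
lemma amiB_gen_step (z : Int) (hz : 0 ≤ z) (s : Option Int) (t : List (Int × Option Int))
    (out : List Int) (lp c : Int) :
    amiB_gen ((z + 4, s) :: t) out lp c
      = amiB_gen ((z, s) :: t)
          ((out ++ (if c % 2 = 0 then [if lp ≤ 0 then (1 : Int) else -1, 0, 0] else [0, 0, 0]))
            ++ [if lp ≤ 0 then (-1 : Int) else 1])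
          (if lp ≤ 0 then (-1 : Int) else 1) (c + 1) := by
  have e4 : PySem.Int.floordiv (z + 4) 4 = PySem.Int.floordiv z 4 + 1 := by
    rw [PySem.Int.floordiv_eq_ediv_of_pos (by omega), PySem.Int.floordiv_eq_ediv_of_pos (by omega)]
    omega
  have em : PySem.Int.mod (z + 4) 4 = PySem.Int.mod z 4 := by
    rw [PySem.Int.mod_eq_emod_of_pos (by omega), PySem.Int.mod_eq_emod_of_pos (by omega)]
    omega
  have hq0 : 0 ≤ PySem.Int.floordiv z 4 := by
    rw [PySem.Int.floordiv_eq_ediv_of_pos (by omega)]; exact Int.ediv_nonneg hz (by omega)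
  have emc : PySem.Int.mod c 2 = c % 2 := PySem.Int.mod_eq_emod_of_pos (by omega)
  set q := PySem.Int.floordiv z 4 with hq
  set v : Int := if lp ≤ 0 then -1 else 1 with hv
  have hvv : (if v ≤ 0 then (-1 : Int) else 1) = v := by
    by_cases h : lp ≤ 0 <;> simp [hv, h]
  have hb : (if lp ≤ 0 then (1 : Int) else -1) = -v := by
    by_cases h : lp ≤ 0 <;> simp [hv, h]
  have hrange : PySem.List.pyRange c (c + (q + 1)) 1 = c :: PySem.List.pyRange (c + 1) (c + (q + 1)) 1 :=
    PySem.List.pyRange_one_cons (by omega)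
  simp only [amiB_gen, e4, em, ← hq, ← hv, hrange, List.foldl_cons, emc, hb,
    if_pos (show q + 1 ≠ 0 by omega)]
  by_cases h0 : q = 0
  · have h1 : c + (q + 1) = c + 1 := by omega
    have hemp : PySem.List.pyRange (c + 1) (c + (q + 1)) 1 = [] := by
      rw [h1, PySem.List.pyRange_one]; simp
    simp [h0, hv]
  · have hrw : c + (q + 1) = c + 1 + q := by ring
    simp only [if_pos h0, hvv, hrw]

-- Main invariant: A's loop, with the pending zeros already appended to its output,
-- equals B's staged generator on the run-length encoding of the remaining input.
lemma amiA_loop_eq_gen_rle (rest : List Int) :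
    ∀ (out : List Int) (lp viol p : Int), 0 ≤ p → p ≤ 3 →
      amiA_loop rest (out ++ List.replicate p.toNat 0) lp p viol
        = amiB_gen (amiB_rle rest p) out lp viol := by
  induction rest with
  | nil =>
    intro out lp viol p hp0 hp3
    simp [amiA_loop, amiB_rle, amiB_gen,
      (show p / 4 = 0 by omega), (show p % 4 = p by omega)]
  | cons s rest ih =>
    intro out lp viol p hp0 hp3
    by_cases hs : s = 0
    · by_cases h4 : p + 1 = 4
      · have hp : p = 3 := by omega
        subst hp hs
        have hrep : (List.replicate (3 : Int).toNat (0 : Int)) = [0, 0, 0] := rfl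
        simp only [amiA_loop, amiB_rle, hrep, if_true,
          (show (3 : Int) + 1 = 4 by norm_num)]
        obtain ⟨k, s', t, hk, hz⟩ := amiB_rle_decomp rest
        have hrle4 : amiB_rle rest 4 = ((0 + k) + 4, s') :: t := by
          rw [hz 4]; norm_num; omega
        have hrle0 : amiB_rle rest 0 = (0 + k, s') :: t := hz 0
        rw [hrle4, amiB_gen_step (0 + k) (by omega) s' t out lp viol, ← hrle0]
        have htake : ((out ++ [(0:Int), 0, 0]).take ((out ++ [(0:Int),0,0]).length - 3)) = out := by
          have : (out ++ [(0:Int), 0, 0]).length - 3 = out.length := by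
            simp [List.length_append]
          rw [this, List.take_left]
        by_cases hb : viol % 2 = 0
        · simp only [if_pos hb, htake, PySem.List.pyGet?_neg_one_append_singleton,
            Option.getD_some]
          have := ih ((out ++ [if lp ≤ 0 then (1:Int) else -1, 0, 0]) ++ [if lp ≤ 0 then (-1:Int) else 1])
            (if lp ≤ 0 then (-1:Int) else 1) (viol + 1) 0 (by omega) (by omega)
          simpa using this
        · simp only [if_neg hb, htake, PySem.List.pyGet?_neg_one_append_singleton,
            Option.getD_some]
          have := ih ((out ++ [(0:Int), 0, 0]) ++ [if lp ≤ 0 then (-1:Int) else 1])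
            (if lp ≤ 0 then (-1:Int) else 1) (viol + 1) 0 (by omega) (by omega)
          simpa using this
      · subst hs
        simp only [amiA_loop, amiB_rle, if_neg h4, if_true]
        have hrep : List.replicate p.toNat (0 : Int) ++ [0] = List.replicate (p + 1).toNat 0 := by
          have : (p + 1).toNat = p.toNat + 1 := by omega
          rw [this, List.replicate_succ']
        have := ih out lp viol (p + 1) (by omega) (by omega)
        rw [← this, ← hrep]
        simp [List.append_assoc]
    · simp only [amiA_loop, amiB_rle, if_neg hs]
      have hgen : amiB_gen ((p, some s) :: amiB_rle rest 0) out lp viol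
          = amiB_gen (amiB_rle rest 0) ((out ++ List.replicate p.toNat 0) ++ [s]) s viol := by
        simp [amiB_gen,
          (show p / 4 = 0 by omega), (show p % 4 = p by omega), List.append_assoc]
      rw [hgen]
      have := ih ((out ++ List.replicate p.toNat 0) ++ [s]) s viol 0 (by omega) (by omega)
      simpa using this

-- ===== VERDICT (by name: the statement is the Claim_ definition above) =====
theorem ami_to_hdb3_spec : Claim_equal_ami_to_hdb3 := by
  intro ami _
  unfold Spec_ami_to_hdb3 ami_to_hdb3 ami_to_hdb3_alt
  simpa using amiA_loop_eq_gen_rle ami [] 0 0 0 (by omega) (by omega)
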